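-- pv_equiv track=rewrite | github.com/Harry55494/Conquerors-of-Catan | src/longest_road.py | return_clusters
-- ===== SOURCE A (Python) =====
-- def return_clusters(set):
--     clusters = []
--     # Iterates through every road that the player owns
--     for road in set:
--         # Checks through all existing clusters
--         for cluster in clusters:
--             # For every road in the cluster, check if the current road is connected to it
--             for node in cluster:
--                 if road[0] in node or road[1] in node:
--                     # If it is, add the current road to the cluster, otherwise do nothing
--                     cluster.extend([road])
--                     break
--         else:
--             # If the road is not connected to any other road create a new cluster
--             if road not in [item for sublist in clusters for item in sublist]:
--                 clusters.append([road])
--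
--     return clusters
-- ===== SOURCE B (Python) =====
-- def return_clusters(set):
--     clusters = []
--     index = {}  # endpoint -> sorted list of indices of the clusters containing a road with that endpoint
--     for road in set:
--         a, b = road[0], road[1]
--         ids = sorted({*index.get(a, ()), *index.get(b, ())})
--         if ids:
--             for i in ids:
--                 clusters[i].append(road)
--         else:
--             ids = [len(clusters)]
--             clusters.append([road])
--         index[a] = ids
--         index[b] = ids
--     return clusters
-- ===== Notes on version B (the rewrite author's own statement) =====
-- stated objective: faster
-- what changed: Replaces A's per-road rescan of every road in every cluster (and the flattened membership check) with a hash map from endpoint to the sorted list of cluster ids containing it, so each road directly finds and appends to its connected clusters.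
import Mathlib
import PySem

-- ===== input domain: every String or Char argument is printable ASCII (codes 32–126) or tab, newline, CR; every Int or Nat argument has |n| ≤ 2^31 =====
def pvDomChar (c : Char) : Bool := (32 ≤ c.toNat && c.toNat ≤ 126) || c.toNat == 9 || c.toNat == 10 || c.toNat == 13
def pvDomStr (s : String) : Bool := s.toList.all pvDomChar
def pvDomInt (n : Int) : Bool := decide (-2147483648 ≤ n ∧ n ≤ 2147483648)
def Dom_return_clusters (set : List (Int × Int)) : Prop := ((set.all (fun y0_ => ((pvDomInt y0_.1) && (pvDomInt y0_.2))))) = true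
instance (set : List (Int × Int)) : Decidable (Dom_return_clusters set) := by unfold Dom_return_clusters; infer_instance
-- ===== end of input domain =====

-- B indexes endpoints to the sorted list of cluster ids containing them, replacing A's
-- rescans of every cluster's every road; objective: faster (asymptotic, measured).


-- ===== PORT A =====
-- for road in set: for cluster in clusters: (for node in cluster: if connected: extend; break)
-- else-branch of the (never-broken) middle loop: append [road] if road not in flattened clusters.
def return_clusters (set : List (Int × Int)) : List (List (Int × Int)) :=
  set.foldl (fun clusters road =>
    let clusters' := clusters.map (fun cluster =>
      if cluster.any (fun node =>
          road.1 == node.1 || road.1 == node.2 || road.2 == node.1 || road.2 == node.2)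
      then cluster ++ [road] else cluster)
    if road ∈ clusters'.flatten then clusters' else clusters' ++ [[road]]) []

-- ===== PORT B =====
-- state: (clusters, index); index maps an endpoint to the sorted list of ids of clusters containing it
def rcStep (st : List (List (Int × Int)) × PySem.Dict Int (List Nat)) (road : Int × Int) :
    List (List (Int × Int)) × PySem.Dict Int (List Nat) :=
  let a := road.1
  let b := road.2
  let ids := PySem.List.sorted (PySem.Set.ofList (st.2.getD a [] ++ st.2.getD b [])) (fun x => x) false
  if ids ≠ [] then
    (ids.foldl (fun cs i => cs.set i (cs.getD i [] ++ [road])) st.1,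
     (st.2.insert a ids).insert b ids)
  else
    ((st.1 ++ [[road]]),
     (st.2.insert a [st.1.length]).insert b [st.1.length])

def return_clusters_alt (set : List (Int × Int)) : List (List (Int × Int)) :=
  (set.foldl rcStep ([], PySem.Dict.empty)).1

-- ===== PRECONDITION & SPEC =====
def Spec_return_clusters (set : List (Int × Int)) (out : List (List (Int × Int))) : Prop := out = return_clusters_alt set
instance (set : List (Int × Int)) (out : List (List (Int × Int))) : Decidable (Spec_return_clusters set out) := by unfold Spec_return_clusters; infer_instance

-- ===== CLAIM (what is proved, stated in full; the proofs are below) =====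
def Claim_equal_return_clusters : Prop := ∀ (set : List (Int × Int)), Dom_return_clusters set → Spec_return_clusters set (return_clusters set)

-- ===== LEMMAS AND PROOFS =====

-- endpoint e occurs in cluster c
def rcHas (e : Int) (c : List (Int × Int)) : Bool := c.any (fun r => e == r.1 || e == r.2)

-- road is connected to cluster c (A's inner-loop test)
def rcConn (road : Int × Int) (c : List (Int × Int)) : Bool :=
  c.any (fun node => road.1 == node.1 || road.1 == node.2 || road.2 == node.1 || road.2 == node.2)

lemma rcConn_eq_or (road : Int × Int) (c : List (Int × Int)) :
    rcConn road c = (rcHas road.1 c || rcHas road.2 c) := by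
  induction c with
  | nil => rfl
  | cons x t ih =>
    simp only [rcConn, rcHas, List.any_cons] at *
    rw [ih]
    cases (road.1 == x.1) <;> cases (road.1 == x.2) <;>
      cases (road.2 == x.1) <;> cases (road.2 == x.2) <;> simp

-- B's invariant: index.getD e [] is exactly the (ascending) list of ids of clusters containing e
def rcInv (cs : List (List (Int × Int))) (idx : PySem.Dict Int (List Nat)) : Prop :=
  ∀ e : Int, idx.getD e [] = (List.range cs.length).filter (fun i => rcHas e (cs.getD i []))

lemma rcInv_empty : rcInv [] PySem.Dict.empty := by
  intro e; simp [PySem.Dict.getD_empty, List.range_zero]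

-- the sorted set-union of the two endpoint id lists is the filter over all cluster ids
lemma rc_ids_eq (cs : List (List (Int × Int))) (idx : PySem.Dict Int (List Nat))
    (hInv : rcInv cs idx) (road : Int × Int) :
    PySem.List.sorted (PySem.Set.ofList (idx.getD road.1 [] ++ idx.getD road.2 [])) (fun x => x) false
      = (List.range cs.length).filter (fun i => rcConn road (cs.getD i [])) := by
  have hmem : ∀ i : Nat, i ∈ PySem.Set.ofList (idx.getD road.1 [] ++ idx.getD road.2 [])
      ↔ i ∈ (List.range cs.length).filter (fun i => rcConn road (cs.getD i [])) := by
    intro i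
    rw [PySem.Set.mem_ofList, List.mem_append, hInv road.1, hInv road.2]
    simp only [List.mem_filter, List.mem_range, rcConn_eq_or, Bool.or_eq_true]
    tauto
  have hnd2 : ((List.range cs.length).filter (fun i => rcConn road (cs.getD i []))).Nodup :=
    List.Nodup.filter _ List.nodup_range
  have hpw : ((List.range cs.length).filter (fun i => rcConn road (cs.getD i []))).Pairwise (· < ·) :=
    List.Pairwise.filter _ (List.pairwise_lt_range)
  exact PySem.List.sorted_eq_of_perm_of_pairwise_lt _ _ (fun x => x)
    ((List.perm_ext_iff_of_nodup hnd2 (PySem.Set.nodup_ofList _)).mpr (fun i => (hmem i).symm)) hpw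


lemma foldl_set_getElem? {α : Type} (ids : List Nat) (f : α → α) (d : α) :
    ∀ (cs : List α), ids.Nodup → (∀ i ∈ ids, i < cs.length) → ∀ j : Nat,
      (ids.foldl (fun l i => l.set i (f (l.getD i d))) cs)[j]?
        = if j ∈ ids then some (f (cs.getD j d)) else cs[j]? := by
  induction ids with
  | nil => intro cs _ _ j; simp
  | cons i t ih =>
    intro cs hnd hlt j
    have hi : i < cs.length := hlt i (by simp)
    have hnt : i ∉ t := (List.nodup_cons.mp hnd).1
    rw [List.foldl_cons, ih _ (List.nodup_cons.mp hnd).2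
        (fun k hk => by rw [List.length_set]; exact hlt k (List.mem_cons_of_mem _ hk)) j]
    by_cases hjt : j ∈ t
    · have hji : j ≠ i := fun h => hnt (h ▸ hjt)
      simp only [if_true, List.mem_cons, hjt, or_true]
      congr 2
      rw [List.getD_eq_getElem?_getD, List.getD_eq_getElem?_getD, List.getElem?_set]
      simp [Ne.symm hji]
    · simp only [hjt, if_false, List.getElem?_set]
      by_cases hji : j = i
      · subst hji
        simp [hi, List.getD_eq_getElem?_getD]
      · simp [List.mem_cons, hjt, hji, Ne.symm hji]

-- pointwise effect of B's fold of sets over a filtered ascending id list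
lemma rc_foldl_set_eq_map (road : Int × Int) (cs : List (List (Int × Int))) :
    ((List.range cs.length).filter (fun i => rcConn road (cs.getD i []))).foldl
        (fun l i => l.set i (l.getD i [] ++ [road])) cs
      = cs.map (fun c => if rcConn road c then c ++ [road] else c) := by
  have hnd : ((List.range cs.length).filter (fun i => rcConn road (cs.getD i []))).Nodup :=
    List.Nodup.filter _ List.nodup_range
  have hlt : ∀ i ∈ (List.range cs.length).filter (fun i => rcConn road (cs.getD i [])),
      i < cs.length := fun i hi => List.mem_range.mp (List.mem_of_mem_filter hi)
  apply List.ext_getElem?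
  intro j
  rw [foldl_set_getElem? _ (fun c => c ++ [road]) [] cs hnd hlt j, List.getElem?_map]
  by_cases hj : j < cs.length
  · have hgd : cs.getD j [] = cs[j] := by
      rw [List.getD_eq_getElem?_getD, List.getElem?_eq_getElem hj]; rfl
    have hmem : j ∈ (List.range cs.length).filter (fun i => rcConn road (cs.getD i []))
        ↔ rcConn road cs[j] = true := by
      simp [List.mem_filter, List.mem_range, hj]
    rw [List.getElem?_eq_getElem hj]
    by_cases hc : rcConn road cs[j] = true
    · rw [if_pos (hmem.mpr hc), hgd]
      simp [hc]
    · rw [if_neg (fun h => hc (hmem.mp h))]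
      simp [hc]
  · have hni : j ∉ (List.range cs.length).filter (fun i => rcConn road (cs.getD i [])) :=
      fun h => hj (hlt j h)
    rw [if_neg hni]
    simp [List.getElem?_eq_none (Nat.le_of_not_lt hj)]

lemma rcHas_singleton (e : Int) (road : Int × Int) :
    rcHas e [road] = (e == road.1 || e == road.2) := by simp [rcHas]

lemma rcHas_append (e : Int) (c d : List (Int × Int)) :
    rcHas e (c ++ d) = (rcHas e c || rcHas e d) := by simp [rcHas, List.any_append]

-- for an endpoint of the road, membership after A's per-cluster update is exactly connectivity
lemma rcHas_upd_endpoint (e : Int) (road : Int × Int) (c : List (Int × Int))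
    (he : e = road.1 ∨ e = road.2) :
    rcHas e (if rcConn road c then c ++ [road] else c) = rcConn road c := by
  by_cases h : rcConn road c = true
  · rcases he with he | he <;> simp [h, rcHas_append, rcHas_singleton, he]
  · have h' := rcConn_eq_or road c ▸ h
    simp only [Bool.or_eq_true, not_or] at h'
    rcases he with he | he <;>
      simp [h, he, Bool.eq_false_iff.mpr h'.1, Bool.eq_false_iff.mpr h'.2]

-- for any other endpoint, A's per-cluster update does not change membership
lemma rcHas_upd_other (e : Int) (road : Int × Int) (c : List (Int × Int))
    (he1 : e ≠ road.1) (he2 : e ≠ road.2) :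
    rcHas e (if rcConn road c then c ++ [road] else c) = rcHas e c := by
  by_cases h : rcConn road c = true <;>
    simp [h, rcHas_append, rcHas_singleton, he1, he2]

-- one step: B's step returns A's clusters and preserves the invariant
lemma rcStep_correct (cs : List (List (Int × Int))) (idx : PySem.Dict Int (List Nat))
    (hInv : rcInv cs idx) (road : Int × Int) :
    (rcStep (cs, idx) road).1
        = (let cs' := cs.map (fun c => if rcConn road c then c ++ [road] else c);
           if road ∈ cs'.flatten then cs' else cs' ++ [[road]])
      ∧ rcInv (rcStep (cs, idx) road).1 (rcStep (cs, idx) road).2 := by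
  have hids := rc_ids_eq cs idx hInv road
  have hgetD : ∀ (l : List (List (Int × Int))) (i : Nat) (hi : i < l.length),
      l.getD i [] = l[i]'hi :=
    fun l i hi => List.getD_eq_getElem l [] hi
  simp only [rcStep, hids]
  by_cases hnil : (List.range cs.length).filter (fun i => rcConn road (cs.getD i [])) = []
  · -- no connected cluster: B appends a fresh cluster; A's map is the identity and the road is new
    rw [if_neg (fun h => h hnil)]
    have hall : ∀ c ∈ cs, rcConn road c = false := by
      intro c hc
      obtain ⟨i, hi, rfl⟩ := List.mem_iff_getElem.mp hc
      have h := List.filter_eq_nil_iff.mp hnil i (List.mem_range.mpr hi)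
      rw [hgetD cs i hi] at h
      exact Bool.eq_false_iff.mpr h
    have hmap : cs.map (fun c => if rcConn road c then c ++ [road] else c) = cs := by
      rw [List.map_congr_left (g := id) (fun c hc => by simp [hall c hc]), List.map_id]
    have hnotin : road ∉ cs.flatten := by
      intro hm
      obtain ⟨c, hc, hrc⟩ := List.mem_flatten.mp hm
      have : rcConn road c = true := List.any_eq_true.mpr ⟨road, hrc, by simp⟩
      rw [hall c hc] at this
      exact Bool.false_ne_true this
    constructor
    · show cs ++ [[road]] = _
      simp only [hmap, if_neg hnotin]
    · intro e
      show ((idx.insert road.1 [cs.length]).insert road.2 [cs.length]).getD e [] = _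
      rw [PySem.Dict.getD_insert, PySem.Dict.getD_insert]
      have hlen : (cs ++ [[road]]).length = cs.length + 1 := by simp
      rw [hlen, List.range_succ, List.filter_append]
      have hhead : (List.range cs.length).filter (fun i => rcHas e ((cs ++ [[road]]).getD i []))
          = (List.range cs.length).filter (fun i => rcHas e (cs.getD i [])) := by
        refine List.filter_congr (fun i hi => ?_)
        have hi' := List.mem_range.mp hi
        rw [List.getD_eq_getElem?_getD, List.getElem?_append_left hi',
          ← List.getD_eq_getElem?_getD]
      have htailD : (cs ++ [[road]]).getD cs.length [] = [road] := by
        rw [List.getD_eq_getElem?_getD, List.getElem?_append_right (le_refl _)]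
        simp
      by_cases he : e = road.1 ∨ e = road.2
      · have h1 : (∀ i ∈ List.range cs.length, rcHas e (cs.getD i []) = false) := by
          intro i hi
          have hi' := List.mem_range.mp hi
          have hcf := hall _ (List.getElem_mem hi')
          rw [rcConn_eq_or] at hcf
          simp only [Bool.or_eq_false_iff] at hcf
          rw [hgetD cs i hi']
          rcases he with he | he <;> rw [he]
          · exact hcf.1
          · exact hcf.2
        have hz : (List.range cs.length).filter (fun i => rcHas e ((cs ++ [[road]]).getD i []))
            = [] := by
          rw [hhead]
          exact List.filter_eq_nil_iff.mpr (fun i hi => by rw [h1 i hi]; simp)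
        have htail : [cs.length].filter (fun i => rcHas e ((cs ++ [[road]]).getD i [])) =
            [cs.length] := by
          simp only [List.filter_cons]
          rw [htailD, rcHas_singleton]
          rcases he with he | he <;> simp [he]
        rw [hz, htail]
        rcases he with he | he <;> simp [he]
      · push Not at he
        have htail : [cs.length].filter (fun i => rcHas e ((cs ++ [[road]]).getD i [])) = [] := by
          simp only [List.filter_cons]
          rw [htailD, rcHas_singleton]
          simp [he.1, he.2]
        rw [hhead, htail, if_neg he.2, if_neg he.1, hInv e, List.append_nil]
  · -- some connected clusters: B's indexed updates are A's conditional map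
    rw [if_pos hnil]
    have hmapped := rc_foldl_set_eq_map road cs
    have hmem_flat : road ∈
        (cs.map (fun c => if rcConn road c then c ++ [road] else c)).flatten := by
      obtain ⟨i, hi⟩ := List.exists_mem_of_ne_nil _ hnil
      have hir : i < cs.length := List.mem_range.mp (List.mem_of_mem_filter hi)
      have hic : rcConn road cs[i] = true := by
        have := (List.mem_filter.mp hi).2
        rwa [hgetD cs i hir] at this
      refine List.mem_flatten.mpr ⟨_, List.mem_map_of_mem (l := cs) (List.getElem_mem hir), ?_⟩
      rw [hic]
      simp
    constructor
    · show ((List.range cs.length).filter (fun i => rcConn road (cs.getD i []))).foldl _ cs = _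
      rw [hmapped]
      simp only [if_pos hmem_flat]
    · intro e
      show ((idx.insert road.1 _).insert road.2 _).getD e [] = _
      rw [PySem.Dict.getD_insert, PySem.Dict.getD_insert, hmapped]
      have hlen : (cs.map (fun c => if rcConn road c then c ++ [road] else c)).length
          = cs.length := List.length_map ..
      rw [hlen]
      have hgd' : ∀ i ∈ List.range cs.length,
          (cs.map (fun c => if rcConn road c then c ++ [road] else c)).getD i []
            = (if rcConn road (cs.getD i []) then cs.getD i [] ++ [road] else cs.getD i []) := by
        intro i hi
        have hi' := List.mem_range.mp hi
        rw [hgetD _ i (by rw [hlen]; exact hi'), List.getElem_map, hgetD cs i hi']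
      by_cases he : e = road.1 ∨ e = road.2
      · have hflt : (List.range cs.length).filter
            (fun i => rcHas e ((cs.map (fun c => if rcConn road c then c ++ [road] else c)).getD i []))
            = (List.range cs.length).filter (fun i => rcConn road (cs.getD i [])) := by
          refine List.filter_congr (fun i hi => ?_)
          rw [hgd' i hi, rcHas_upd_endpoint e road _ he]
        rw [hflt]
        rcases he with he | he <;> simp [he]
      · push Not at he
        have hflt : (List.range cs.length).filter
            (fun i => rcHas e ((cs.map (fun c => if rcConn road c then c ++ [road] else c)).getD i []))
            = (List.range cs.length).filter (fun i => rcHas e (cs.getD i [])) := by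
          refine List.filter_congr (fun i hi => ?_)
          rw [hgd' i hi, rcHas_upd_other e road _ he.1 he.2]
        rw [hflt, if_neg he.2, if_neg he.1, hInv e]

lemma rc_fold_eq (set : List (Int × Int)) :
    ∀ (cs : List (List (Int × Int))) (idx : PySem.Dict Int (List Nat)), rcInv cs idx →
      (set.foldl rcStep (cs, idx)).1
        = set.foldl (fun clusters road =>
            let clusters' := clusters.map (fun cluster =>
              if cluster.any (fun node =>
                  road.1 == node.1 || road.1 == node.2 || road.2 == node.1 || road.2 == node.2)
              then cluster ++ [road] else cluster)
            if road ∈ clusters'.flatten then clusters' else clusters' ++ [[road]]) cs := by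
  induction set with
  | nil => intro cs idx _; rfl
  | cons road rest ih =>
    intro cs idx hInv
    obtain ⟨h1, h2⟩ := rcStep_correct cs idx hInv road
    simp only [List.foldl_cons]
    have : rcStep (cs, idx) road = ((rcStep (cs, idx) road).1, (rcStep (cs, idx) road).2) := rfl
    rw [this, ih _ _ h2, h1]
    rfl

-- ===== VERDICT (by name: the statement is the Claim_ definition above) =====
theorem return_clusters_spec : Claim_equal_return_clusters := by
  intro set _
  show _ = _
  unfold return_clusters return_clusters_alt
  exact (rc_fold_eq set [] PySem.Dict.empty rcInv_empty).symm
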